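-- pv_equiv track=rewrite | github.com/dsd-hamsa/powerset | powerset/data_extractors.py | extract_hardware_summary
-- ===== SOURCE A (Python) =====
-- from typing import Dict, List, Any, Optional, Union
--
-- def extract_hardware_summary(site_data: Dict[str, Any]) -> Dict[str, Any]:
--     """
--     Extract hardware summary statistics from site data.
--
--     Args:
--         site_data: Raw site data from API
--
--     Returns:
--         Dict with hardware summary statistics
--     """
--     hardware = site_data.get('hardware', [])
--
--     summary = {
--         'total_devices': len(hardware),
--         'inverters': 0,
--         'meters': 0,
--         'weather_stations': 0,
--         'gateways': 0,
--         'other_devices': 0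
--     }
--
--     for device in hardware:
--         func_code = device.get('functionCode')
--         if func_code == 1:
--             summary['inverters'] += 1
--         elif func_code in [2, 3, 4, 20, 37]:
--             summary['meters'] += 1
--         elif func_code == 5:
--             summary['weather_stations'] += 1
--         elif func_code == 10:
--             summary['gateways'] += 1
--         else:
--             summary['other_devices'] += 1
--
--     return summary
-- ===== SOURCE B (Python) =====
-- def extract_hardware_summary(site_data):
--     hardware = site_data.get('hardware', [])
--     codes = [device.get('functionCode') for device in hardware]
--     inverters = codes.count(1)
--     meters = sum(codes.count(c) for c in (2, 3, 4, 20, 37))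
--     weather_stations = codes.count(5)
--     gateways = codes.count(10)
--     return {
--         'total_devices': len(hardware),
--         'inverters': inverters,
--         'meters': meters,
--         'weather_stations': weather_stations,
--         'gateways': gateways,
--         'other_devices': len(hardware) - inverters - meters - weather_stations - gateways,
--     }
-- ===== Notes on version B (the rewrite author's own statement) =====
-- stated objective: alternative
-- what changed: Replaces A's single pass with a per-device five-way branch chain incrementing dict buckets by staged per-category counting: extract the functionCode list once, compute each category with list.count, derive other_devices by subtraction from the total, and build the result dict directly with no increments.
import Mathlib
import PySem

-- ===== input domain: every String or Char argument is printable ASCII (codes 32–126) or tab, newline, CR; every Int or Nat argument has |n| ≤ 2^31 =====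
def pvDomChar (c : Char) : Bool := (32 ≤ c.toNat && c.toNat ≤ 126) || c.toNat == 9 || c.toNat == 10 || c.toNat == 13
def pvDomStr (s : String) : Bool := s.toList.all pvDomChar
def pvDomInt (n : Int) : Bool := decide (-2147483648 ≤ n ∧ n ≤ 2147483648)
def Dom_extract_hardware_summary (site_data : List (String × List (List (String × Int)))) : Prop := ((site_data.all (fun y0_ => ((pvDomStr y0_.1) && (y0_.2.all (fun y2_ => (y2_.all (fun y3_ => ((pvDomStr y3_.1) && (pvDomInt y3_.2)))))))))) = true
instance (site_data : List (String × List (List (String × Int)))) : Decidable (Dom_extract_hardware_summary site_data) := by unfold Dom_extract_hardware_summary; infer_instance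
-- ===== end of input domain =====

-- B replaces A's per-device branch-chain bucket increments by staged per-category counting over the
-- extracted functionCode list, deriving other_devices by subtraction (alternative; same cost).


-- ===== PORT A =====
def extract_hardware_summary (site_data : List (String × List (List (String × Int)))) : List (String × Int) :=
  let hardware := (PySem.Dict.mk site_data).getD "hardware" []
  let summary : PySem.Dict String Int := PySem.Dict.mk
    [("total_devices", (hardware.length : Int)), ("inverters", 0), ("meters", 0),
     ("weather_stations", 0), ("gateways", 0), ("other_devices", 0)]
  let summary := hardware.foldl (fun s device =>
    let func_code := (PySem.Dict.mk device).get? "functionCode"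
    if func_code = some 1 then s.modify "inverters" 0 (· + 1)
    else if func_code ∈ [some (2 : Int), some 3, some 4, some 20, some 37] then s.modify "meters" 0 (· + 1)
    else if func_code = some 5 then s.modify "weather_stations" 0 (· + 1)
    else if func_code = some 10 then s.modify "gateways" 0 (· + 1)
    else s.modify "other_devices" 0 (· + 1)) summary
  summary.items

-- ===== PORT B =====
def extract_hardware_summary_alt (site_data : List (String × List (List (String × Int)))) : List (String × Int) :=
  let hardware := (PySem.Dict.mk site_data).getD "hardware" []
  let codes := hardware.map (fun device => (PySem.Dict.mk device).get? "functionCode")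
  let inverters : Int := PySem.List.count codes (some 1)
  let meters : Int := (([2, 3, 4, 20, 37] : List Int).map
    (fun c => (PySem.List.count codes (some c) : Int))).sum
  let weather_stations : Int := PySem.List.count codes (some 5)
  let gateways : Int := PySem.List.count codes (some 10)
  [("total_devices", (hardware.length : Int)), ("inverters", inverters), ("meters", meters),
   ("weather_stations", weather_stations), ("gateways", gateways),
   ("other_devices", (hardware.length : Int) - inverters - meters - weather_stations - gateways)]

-- ===== PRECONDITION & SPEC =====
def Spec_extract_hardware_summary (site_data : List (String × List (List (String × Int)))) (out : List (String × Int)) : Prop := out = extract_hardware_summary_alt site_data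
instance (site_data : List (String × List (List (String × Int)))) (out : List (String × Int)) : Decidable (Spec_extract_hardware_summary site_data out) := by unfold Spec_extract_hardware_summary; infer_instance

-- ===== CLAIM (what is proved, stated in full; the proofs are below) =====
def Claim_equal_extract_hardware_summary : Prop := ∀ (site_data : List (String × List (List (String × Int)))), Dom_extract_hardware_summary site_data → Spec_extract_hardware_summary site_data (extract_hardware_summary site_data)

-- ===== LEMMAS AND PROOFS =====

-- the functionCode of one device, and how many devices carry code v
def pvF (device : List (String × Int)) : Option Int := (PySem.Dict.mk device).get? "functionCode"

def pvCnt (hw : List (List (String × Int))) (v : Int) : Int :=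
  ((hw.map pvF).count (some v) : Int)

-- the bucket A's branch chain selects for one device
def pvKey (device : List (String × Int)) : String :=
  if pvF device = some 1 then "inverters"
  else if pvF device ∈ [some (2 : Int), some 3, some 4, some 20, some 37] then "meters"
  else if pvF device = some 5 then "weather_stations"
  else if pvF device = some 10 then "gateways"
  else "other_devices"

theorem pvKey_mem (d : List (String × Int)) :
    pvKey d ∈ ["inverters", "meters", "weather_stations", "gateways", "other_devices"] := by
  unfold pvKey; split_ifs <;> simp

-- A's branch chain is: bump the selected bucket
theorem pv_step_eq (s : PySem.Dict String Int) (device : List (String × Int)) :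
    (if (PySem.Dict.mk device).get? "functionCode" = some 1 then s.modify "inverters" 0 (· + 1)
     else if (PySem.Dict.mk device).get? "functionCode" ∈ [some (2 : Int), some 3, some 4, some 20, some 37] then s.modify "meters" 0 (· + 1)
     else if (PySem.Dict.mk device).get? "functionCode" = some 5 then s.modify "weather_stations" 0 (· + 1)
     else if (PySem.Dict.mk device).get? "functionCode" = some 10 then s.modify "gateways" 0 (· + 1)
     else s.modify "other_devices" 0 (· + 1))
    = s.modify (pvKey device) 0 (· + 1) := by
  unfold pvKey pvF
  split_ifs <;> rfl

-- bumping each named bucket of the literal summary dict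
theorem pvMod_inv (t i m w g o : Int) :
    (PySem.Dict.mk [("total_devices", t), ("inverters", i), ("meters", m),
      ("weather_stations", w), ("gateways", g), ("other_devices", o)]).modify "inverters" 0 (· + 1)
    = PySem.Dict.mk [("total_devices", t), ("inverters", i + 1), ("meters", m),
      ("weather_stations", w), ("gateways", g), ("other_devices", o)] := by
  simp [PySem.Dict.modify, PySem.Dict.insert, PySem.Dict.getD, PySem.Dict.get?]

theorem pvMod_met (t i m w g o : Int) :
    (PySem.Dict.mk [("total_devices", t), ("inverters", i), ("meters", m),
      ("weather_stations", w), ("gateways", g), ("other_devices", o)]).modify "meters" 0 (· + 1)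
    = PySem.Dict.mk [("total_devices", t), ("inverters", i), ("meters", m + 1),
      ("weather_stations", w), ("gateways", g), ("other_devices", o)] := by
  simp [PySem.Dict.modify, PySem.Dict.insert, PySem.Dict.getD, PySem.Dict.get?]

theorem pvMod_ws (t i m w g o : Int) :
    (PySem.Dict.mk [("total_devices", t), ("inverters", i), ("meters", m),
      ("weather_stations", w), ("gateways", g), ("other_devices", o)]).modify "weather_stations" 0 (· + 1)
    = PySem.Dict.mk [("total_devices", t), ("inverters", i), ("meters", m),
      ("weather_stations", w + 1), ("gateways", g), ("other_devices", o)] := by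
  simp [PySem.Dict.modify, PySem.Dict.insert, PySem.Dict.getD, PySem.Dict.get?]

theorem pvMod_gw (t i m w g o : Int) :
    (PySem.Dict.mk [("total_devices", t), ("inverters", i), ("meters", m),
      ("weather_stations", w), ("gateways", g), ("other_devices", o)]).modify "gateways" 0 (· + 1)
    = PySem.Dict.mk [("total_devices", t), ("inverters", i), ("meters", m),
      ("weather_stations", w), ("gateways", g + 1), ("other_devices", o)] := by
  simp [PySem.Dict.modify, PySem.Dict.insert, PySem.Dict.getD, PySem.Dict.get?]

theorem pvMod_oth (t i m w g o : Int) :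
    (PySem.Dict.mk [("total_devices", t), ("inverters", i), ("meters", m),
      ("weather_stations", w), ("gateways", g), ("other_devices", o)]).modify "other_devices" 0 (· + 1)
    = PySem.Dict.mk [("total_devices", t), ("inverters", i), ("meters", m),
      ("weather_stations", w), ("gateways", g), ("other_devices", o + 1)] := by
  simp [PySem.Dict.modify, PySem.Dict.insert, PySem.Dict.getD, PySem.Dict.get?]

-- folding the bucket bumps over the literal summary dict adds each key's count
theorem pvFoldKeys (ks : List String)
    (h : ∀ k ∈ ks, k ∈ ["inverters", "meters", "weather_stations", "gateways", "other_devices"])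
    (t i m w g o : Int) :
    ks.foldl (fun s k => s.modify k 0 (· + 1))
      (PySem.Dict.mk [("total_devices", t), ("inverters", i), ("meters", m),
                      ("weather_stations", w), ("gateways", g), ("other_devices", o)])
    = PySem.Dict.mk [("total_devices", t),
        ("inverters", i + (ks.count "inverters" : Int)),
        ("meters", m + (ks.count "meters" : Int)),
        ("weather_stations", w + (ks.count "weather_stations" : Int)),
        ("gateways", g + (ks.count "gateways" : Int)),
        ("other_devices", o + (ks.count "other_devices" : Int))] := by
  induction ks generalizing t i m w g o with
  | nil => simp
  | cons k rest ih =>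
    have hk := h k (List.mem_cons_self ..)
    have hrest : ∀ k' ∈ rest, k' ∈ ["inverters", "meters", "weather_stations", "gateways", "other_devices"] :=
      fun k' hk' => h k' (List.mem_cons_of_mem _ hk')
    simp only [List.mem_cons, List.not_mem_nil, or_false] at hk
    simp only [List.foldl_cons]
    rcases hk with rfl | rfl | rfl | rfl | rfl
    · rw [pvMod_inv, ih hrest]; simp; ring
    · rw [pvMod_met, ih hrest]; simp; ring
    · rw [pvMod_ws, ih hrest]; simp; ring
    · rw [pvMod_gw, ih hrest]; simp; ring
    · rw [pvMod_oth, ih hrest]; simp; ring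

-- key ↔ functionCode characterisations
theorem pvKey_eq_inv (d : List (String × Int)) : (pvKey d = "inverters") ↔ pvF d = some 1 := by
  unfold pvKey; split_ifs <;> simp_all

theorem pvKey_eq_met (d : List (String × Int)) :
    (pvKey d = "meters") ↔ pvF d ∈ [some (2 : Int), some 3, some 4, some 20, some 37] := by
  unfold pvKey; split_ifs with h1 <;> simp_all

theorem pvKey_eq_ws (d : List (String × Int)) : (pvKey d = "weather_stations") ↔ pvF d = some 5 := by
  unfold pvKey
  split_ifs with h1 h2 h3 h4 <;> simp_all
  all_goals rcases h2 with h | h | h | h | h <;> simp_all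

theorem pvKey_eq_gw (d : List (String × Int)) : (pvKey d = "gateways") ↔ pvF d = some 10 := by
  unfold pvKey
  split_ifs with h1 h2 h3 h4 <;> simp_all
  all_goals rcases h2 with h | h | h | h | h <;> simp_all

theorem pvCnt_cons (d : List (String × Int)) (hw : List (List (String × Int))) (v : Int) :
    pvCnt (d :: hw) v = pvCnt hw v + (if pvF d = some v then 1 else 0) := by
  simp [pvCnt, List.count_cons]

theorem pvCount_inv (hw : List (List (String × Int))) :
    (((hw.map pvKey).count "inverters" : Nat) : Int) = pvCnt hw 1 := by
  induction hw with
  | nil => simp [pvCnt]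
  | cons d rest ih =>
    simp only [List.map_cons, List.count_cons, pvCnt_cons]
    rw [← ih]
    by_cases h : pvF d = some 1 <;>
      simp [pvKey_eq_inv, h]

theorem pvCount_ws (hw : List (List (String × Int))) :
    (((hw.map pvKey).count "weather_stations" : Nat) : Int) = pvCnt hw 5 := by
  induction hw with
  | nil => simp [pvCnt]
  | cons d rest ih =>
    simp only [List.map_cons, List.count_cons, pvCnt_cons]
    rw [← ih]
    by_cases h : pvF d = some 5 <;>
      simp [pvKey_eq_ws, h]

theorem pvCount_gw (hw : List (List (String × Int))) :
    (((hw.map pvKey).count "gateways" : Nat) : Int) = pvCnt hw 10 := by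
  induction hw with
  | nil => simp [pvCnt]
  | cons d rest ih =>
    simp only [List.map_cons, List.count_cons, pvCnt_cons]
    rw [← ih]
    by_cases h : pvF d = some 10 <;>
      simp [pvKey_eq_gw, h]

theorem pvCount_met (hw : List (List (String × Int))) :
    (((hw.map pvKey).count "meters" : Nat) : Int)
    = pvCnt hw 2 + pvCnt hw 3 + pvCnt hw 4 + pvCnt hw 20 + pvCnt hw 37 := by
  induction hw with
  | nil => simp [pvCnt]
  | cons d rest ih =>
    simp only [List.map_cons, List.count_cons, pvCnt_cons]
    by_cases h : pvF d ∈ [some (2 : Int), some 3, some 4, some 20, some 37]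
    · have hb : (pvKey d == "meters") = true := by simp [pvKey_eq_met, h]
      have := h
      simp only [List.mem_cons, List.not_mem_nil, or_false] at this
      rcases this with h2 | h2 | h2 | h2 | h2 <;>
        (simp [hb, h2]; rw [ih]; ring)
    · have hb : (pvKey d == "meters") = false := by
        simp [pvKey_eq_met, h]
      have h2 : pvF d ≠ some 2 := by intro hh; exact h (by simp [hh])
      have h3 : pvF d ≠ some 3 := by intro hh; exact h (by simp [hh])
      have h4 : pvF d ≠ some 4 := by intro hh; exact h (by simp [hh])
      have h20 : pvF d ≠ some 20 := by intro hh; exact h (by simp [hh])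
      have h37 : pvF d ≠ some 37 := by intro hh; exact h (by simp [hh])
      simp [hb, h2, h3, h4, h20, h37]
      rw [← ih]

-- every device lands in exactly one bucket
theorem pvCount_total (hw : List (List (String × Int))) :
    (hw.map pvKey).count "inverters" + (hw.map pvKey).count "meters"
      + (hw.map pvKey).count "weather_stations" + (hw.map pvKey).count "gateways"
      + (hw.map pvKey).count "other_devices" = hw.length := by
  induction hw with
  | nil => simp
  | cons d rest ih =>
    simp only [List.map_cons, List.count_cons, List.length_cons]
    have hk := pvKey_mem d
    simp only [List.mem_cons, List.not_mem_nil, or_false] at hk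
    rcases hk with h | h | h | h | h <;> simp [h] <;> omega

theorem pvCount_oth (hw : List (List (String × Int))) :
    (((hw.map pvKey).count "other_devices" : Nat) : Int)
    = (hw.length : Int) - pvCnt hw 1
      - (pvCnt hw 2 + pvCnt hw 3 + pvCnt hw 4 + pvCnt hw 20 + pvCnt hw 37)
      - pvCnt hw 5 - pvCnt hw 10 := by
  have ht := pvCount_total hw
  have h1 := pvCount_inv hw
  have h2 := pvCount_met hw
  have h3 := pvCount_ws hw
  have h4 := pvCount_gw hw
  omega

-- ===== VERDICT (by name: the statement is the Claim_ definition above) =====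
theorem extract_hardware_summary_spec : Claim_equal_extract_hardware_summary := by
  intro site_data _
  unfold Spec_extract_hardware_summary extract_hardware_summary extract_hardware_summary_alt
  simp only []
  set hw := (PySem.Dict.mk site_data).getD "hardware" [] with hhw
  have hfold : hw.foldl (fun s device =>
      let func_code := (PySem.Dict.mk device).get? "functionCode"
      if func_code = some 1 then s.modify "inverters" 0 (· + 1)
      else if func_code ∈ [some (2 : Int), some 3, some 4, some 20, some 37] then s.modify "meters" 0 (· + 1)
      else if func_code = some 5 then s.modify "weather_stations" 0 (· + 1)
      else if func_code = some 10 then s.modify "gateways" 0 (· + 1)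
      else s.modify "other_devices" 0 (· + 1))
      (PySem.Dict.mk [("total_devices", (hw.length : Int)), ("inverters", 0), ("meters", 0),
        ("weather_stations", 0), ("gateways", 0), ("other_devices", 0)])
      = (hw.map pvKey).foldl (fun s k => s.modify k 0 (· + 1))
        (PySem.Dict.mk [("total_devices", (hw.length : Int)), ("inverters", 0), ("meters", 0),
          ("weather_stations", 0), ("gateways", 0), ("other_devices", 0)]) := by
    rw [List.foldl_map]
    exact PySem.List.foldl_congr_mem _ _ _ _ (fun s d _ => pv_step_eq s d)
  rw [hfold, pvFoldKeys (hw.map pvKey) (by intro k hk; rcases List.mem_map.1 hk with ⟨d, _, rfl⟩; exact pvKey_mem d)]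
  have hcodes : hw.map (fun device => (PySem.Dict.mk device).get? "functionCode") = hw.map pvF := rfl
  simp only [hcodes, List.map_cons, List.map_nil, List.sum_cons, List.sum_nil,
    PySem.List.count_eq]
  rw [pvCount_inv, pvCount_met, pvCount_ws, pvCount_gw, pvCount_oth]
  simp [pvCnt]
  ring_nf
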